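-- pv_equiv track=rewrite | github.com/zzzz2323/HPO_agent | tools/recall.py | filter_nested_spans
-- ===== SOURCE A (Python) =====
-- from typing import List, Dict, Any, Set
--
-- def filter_nested_spans(spans: List[str]) -> List[str]:
--     """
--     过滤掉长度小于3个词的、且被其他更长 Span 包含的冗余子 Span。
--     """
--     # 按照长度从长到短排序
--     spans.sort(key=len, reverse=True)
--     filtered_spans = []
--
--     for current_span in spans:
--         current_span_words = len(current_span.split())
--         is_nested_and_short = False
--
--         # 仅检查长度小于3个词的 Span
--         if current_span_words < 3:
--             for kept_span in filtered_spans: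
--                 # 检查是否是已保留 Span 的子集
--                 if current_span in kept_span:
--                     is_nested_and_short = True
--                     break
--
--         if not is_nested_and_short:
--             filtered_spans.append(current_span)
--
--     return filtered_spans
-- ===== SOURCE B (Python) =====
-- def filter_nested_spans(spans):
--     # Stateless reformulation: after the length-descending sort, a short span is
--     # redundant iff it is a substring of ANY earlier span in the sorted list
--     # (substring containment is transitive, so checking the raw prefix is
--     # equivalent to checking the maintained survivor list).
--     spans.sort(key=len, reverse=True)
--     return [s for i, s in enumerate(spans)
--             if len(s.split()) >= 3 or not any(s in t for t in spans[:i])]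
-- ===== Notes on version B (the rewrite author's own statement) =====
-- stated objective: simpler
-- what changed: Replaces the accumulator loop that checks each short span against the dynamically maintained survivor list with a stateless comprehension that checks each short span against the raw sorted prefix; the two agree because substring containment is transitive.
import Mathlib
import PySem

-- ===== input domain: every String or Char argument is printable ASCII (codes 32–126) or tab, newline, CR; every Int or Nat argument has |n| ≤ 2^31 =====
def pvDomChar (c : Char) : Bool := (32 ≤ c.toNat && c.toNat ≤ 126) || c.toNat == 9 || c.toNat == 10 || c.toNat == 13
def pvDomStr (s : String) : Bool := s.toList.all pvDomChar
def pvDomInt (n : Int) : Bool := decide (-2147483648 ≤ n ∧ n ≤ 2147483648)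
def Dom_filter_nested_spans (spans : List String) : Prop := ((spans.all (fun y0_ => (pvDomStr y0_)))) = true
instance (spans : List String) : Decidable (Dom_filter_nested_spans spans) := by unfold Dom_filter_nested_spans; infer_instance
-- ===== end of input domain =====

-- B replaces A's loop over a maintained survivor list by a stateless comprehension
-- checking each short span against the raw sorted prefix (objective: simpler).
-- Both Pythons sort the input list in place; the equivalence proved here is about
-- the return value (the in-place sort is identical in A and B).

-- ===== PORT A =====
def pvStepA (filtered : List String) (cur : String) : List String :=
  let words := PySem.List.len (PySem.Str.split₀ cur)
  let isNested := if words < 3 then filtered.any (fun k => PySem.Str.isIn cur k) else false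
  if isNested then filtered else filtered ++ [cur]

def filter_nested_spans (spans : List String) : List String :=
  let sortedSpans := PySem.List.sorted spans (fun s => PySem.Str.len s) true
  sortedSpans.foldl pvStepA []

-- ===== PORT B =====
def filter_nested_spans_alt (spans : List String) : List String :=
  let ss := PySem.List.sorted spans (fun s => PySem.Str.len s) true
  ((PySem.List.enumerate ss 0).filter (fun p =>
      decide (3 ≤ PySem.List.len (PySem.Str.split₀ p.2)) ||
      !(PySem.List.slice ss none (some p.1)).any (fun t => PySem.Str.isIn p.2 t))).map
    (fun p => p.2)

-- ===== PRECONDITION & SPEC =====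
def Spec_filter_nested_spans (spans : List String) (out : List String) : Prop := out = filter_nested_spans_alt spans
instance (spans : List String) (out : List String) : Decidable (Spec_filter_nested_spans spans out) := by unfold Spec_filter_nested_spans; infer_instance

-- ===== CLAIM (what is proved, stated in full; the proofs are below) =====
def Claim_equal_filter_nested_spans : Prop := ∀ (spans : List String), Dom_filter_nested_spans spans → Spec_filter_nested_spans spans (filter_nested_spans spans)

-- ===== LEMMAS AND PROOFS =====

-- keep-condition shared by both loop shapes (`seen` = the already-processed prefix)
def pvKeep (seen : List String) (s : String) : Bool :=
  decide (3 ≤ PySem.List.len (PySem.Str.split₀ s)) || !seen.any (fun t => PySem.Str.isIn s t)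

-- the common scan both loop shapes reduce to
def pvScan (seen : List String) : List String → List String
  | [] => []
  | s :: rest =>
      if pvKeep seen s then s :: pvScan (seen ++ [s]) rest
      else pvScan (seen ++ [s]) rest

theorem pv_isIn_trans {u s t : String}
    (h1 : PySem.Str.isIn u s = true) (h2 : PySem.Str.isIn s t = true) :
    PySem.Str.isIn u t = true := by
  rw [PySem.Str.isIn_iff_infix] at *
  exact h1.trans h2

theorem pvStepA_eq (kept : List String) (s : String) :
    pvStepA kept s = if pvKeep kept s then kept ++ [s] else kept := by
  cases hk : pvKeep kept s with
  | true =>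
    rw [if_pos rfl]
    simp only [pvStepA]
    have hk' : 3 ≤ (PySem.Str.split₀ s).length ∨
        ∀ x ∈ kept, PySem.Chars.isIn s.toList x.toList = false := by
      simpa [pvKeep] using hk
    have hnest : (if PySem.List.len (PySem.Str.split₀ s) < 3
        then kept.any (fun k => PySem.Str.isIn s k) else false) = false := by
      by_cases hw : PySem.List.len (PySem.Str.split₀ s) < 3
      · rw [if_pos hw]
        have hwn : (PySem.Str.split₀ s).length < 3 := by
          have h := hw; rw [PySem.List.len_eq] at h; exact_mod_cast h
        rcases hk' with h1 | h2
        · omega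
        · rw [List.any_eq_false]
          intro x hx
          simpa using h2 x hx
      · exact if_neg hw
    rw [hnest]
    simp
  | false =>
    rw [if_neg (by simp)]
    simp only [pvStepA]
    have hk' : (PySem.Str.split₀ s).length < 3 ∧
        ∃ x ∈ kept, PySem.Chars.isIn s.toList x.toList = true := by
      simpa [pvKeep] using hk
    have hw : PySem.List.len (PySem.Str.split₀ s) < 3 := by
      rw [PySem.List.len_eq]; exact_mod_cast hk'.1
    have hany : kept.any (fun k => PySem.Str.isIn s k) = true := by
      rcases hk'.2 with ⟨x, hx, hxin⟩
      exact List.any_eq_true.mpr ⟨x, hx, by simpa using hxin⟩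
    rw [if_pos hw, hany]
    simp

theorem pvKeep_congr (seen kept : List String) (s : String)
    (h : kept.any (fun k => PySem.Str.isIn s k) = seen.any (fun k => PySem.Str.isIn s k)) :
    pvKeep kept s = pvKeep seen s := by
  unfold pvKeep; rw [h]

theorem pv_loopA (rest : List String) :
    ∀ (seen kept : List String),
    (∀ u : String, kept.any (fun k => PySem.Str.isIn u k) = seen.any (fun k => PySem.Str.isIn u k)) →
    rest.foldl pvStepA kept = kept ++ pvScan seen rest := by
  induction rest with
  | nil => intro seen kept h; simp [pvScan]
  | cons s rest ih =>
    intro seen kept h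
    rw [List.foldl_cons, pvStepA_eq, pvKeep_congr seen kept s (h s)]
    have hinv_keep : ∀ u : String,
        (kept ++ [s]).any (fun k => PySem.Str.isIn u k) =
        (seen ++ [s]).any (fun k => PySem.Str.isIn u k) := by
      intro u; rw [List.any_append, List.any_append, h u]
    cases hc : pvKeep seen s with
    | true =>
      rw [if_pos rfl, ih (seen ++ [s]) (kept ++ [s]) hinv_keep]
      simp [pvScan, hc]
    | false =>
      rw [if_neg (by simp)]
      rw [show kept ++ pvScan seen (s :: rest) = kept ++ pvScan (seen ++ [s]) rest by
        simp [pvScan, hc]]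
      -- s was dropped: s is a substring of something already seen
      have hseen_s : seen.any (fun t => PySem.Str.isIn s t) = true := by
        unfold pvKeep at hc
        rcases Bool.or_eq_false_iff.mp hc with ⟨_, h2⟩
        simpa using h2
      have hkept_s : kept.any (fun k => PySem.Str.isIn s k) = true := by
        rw [h s]; exact hseen_s
      apply ih (seen ++ [s]) kept
      intro u
      rw [List.any_append, ← h u, List.any_cons, List.any_nil, Bool.or_false]
      cases hu : PySem.Str.isIn u s with
      | false => simp
      | true =>
        obtain ⟨k, hkmem, hks⟩ := List.any_eq_true.mp hkept_s
        have : kept.any (fun k => PySem.Str.isIn u k) = true :=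
          List.any_eq_true.mpr ⟨k, hkmem, pv_isIn_trans hu hks⟩
        rw [this]; simp

theorem pv_loopB (rest : List String) :
    ∀ (pre full : List String), full = pre ++ rest →
    ((PySem.List.enumerate rest (pre.length : Int)).filter (fun p =>
        decide (3 ≤ PySem.List.len (PySem.Str.split₀ p.2)) ||
        !(PySem.List.slice full none (some p.1)).any (fun t => PySem.Str.isIn p.2 t))).map
      (fun p => p.2)
    = pvScan pre rest := by
  induction rest with
  | nil => intro pre full _; simp [PySem.List.enumerate, pvScan]
  | cons s rest ih =>
    intro pre full hfull
    have hslice : PySem.List.slice full none (some (pre.length : Int)) = pre := by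
      rw [PySem.List.slice_to_natCast, hfull, List.take_left]
    have hstep : ((pre.length : Int) + 1) = (((pre ++ [s]).length : Int)) := by
      push_cast [List.length_append, List.length_singleton]; omega
    have hfull' : full = (pre ++ [s]) ++ rest := by simp [hfull]
    rw [PySem.List.enumerate_cons, List.filter_cons]
    cases hc : pvKeep pre s with
    | true =>
      rw [if_pos (by simpa [hslice, pvKeep] using hc)]
      rw [List.map_cons, hstep, ih (pre ++ [s]) full hfull']
      simp [pvScan, hc]
    | false =>
      rw [if_neg (by simp only [hslice]; simpa [pvKeep] using hc)]
      rw [hstep, ih (pre ++ [s]) full hfull']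
      simp [pvScan, hc]

-- ===== VERDICT (by name: the statement is the Claim_ definition above) =====
theorem filter_nested_spans_spec : Claim_equal_filter_nested_spans := by
  intro spans _
  unfold Spec_filter_nested_spans filter_nested_spans filter_nested_spans_alt
  rw [pv_loopA (PySem.List.sorted spans (fun s => PySem.Str.len s) true) [] [] (fun u => rfl)]
  have := pv_loopB (PySem.List.sorted spans (fun s => PySem.Str.len s) true) []
    (PySem.List.sorted spans (fun s => PySem.Str.len s) true) (by simp)
  simpa using this.symm
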